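-- pv_equiv track=rewrite | github.com/Davolkoff/mhfi_bot | sm_info.py | make_value
-- ===== SOURCE A (Python) =====
-- def make_value(value):
--     if "," in value:
--         value = value.replace(",", ".")
--     if " " in value:
--         value = value.replace(" ", "")
--     if "%" in value:
--         value = value. replace("%", "")
--     return ''.join(i for i in value if not i.isalpha())
-- ===== SOURCE B (Python) =====
-- def make_value(value):
--     out = []
--     for ch in value:
--         if ch.isalpha():
--             continue
--         if ch == ',':
--             out.append('.')
--         elif ch not in ' %':
--             out.append(ch)
--     return ''.join(out)
-- ===== Notes on version B (the rewrite author's own statement) =====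
-- stated objective: simpler
-- what changed: Replaced three sequential full-string replace() passes plus a final filtering join with a single fused per-character pass that maps the comma separator to a dot and drops spaces, percent signs and alphabetic characters directly.
import Mathlib
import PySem

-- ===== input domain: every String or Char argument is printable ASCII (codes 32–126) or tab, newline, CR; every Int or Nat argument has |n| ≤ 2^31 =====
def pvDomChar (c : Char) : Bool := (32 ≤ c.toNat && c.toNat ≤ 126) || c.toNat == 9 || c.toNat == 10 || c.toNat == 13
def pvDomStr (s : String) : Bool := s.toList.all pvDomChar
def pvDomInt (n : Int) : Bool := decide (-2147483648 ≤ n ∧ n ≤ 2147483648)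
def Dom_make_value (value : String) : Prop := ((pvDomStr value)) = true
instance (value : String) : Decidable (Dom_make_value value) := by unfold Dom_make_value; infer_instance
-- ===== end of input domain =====

-- B fuses A's three replace() passes + filtering join into one per-character pass (objective: simpler).

-- ===== PORT A =====
def make_value (value : String) : String :=
  let v0 := value.toList
  let v1 := if PySem.Chars.isIn [','] v0 then PySem.Chars.replace v0 [','] ['.'] else v0
  let v2 := if PySem.Chars.isIn [' '] v1 then PySem.Chars.replace v1 [' '] [] else v1
  let v3 := if PySem.Chars.isIn ['%'] v2 then PySem.Chars.replace v2 ['%'] [] else v2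
  String.mk (PySem.Chars.join [] ((v3.filter (fun c => !PySem.Chars.isalpha c)).map (fun c => [c])))

-- ===== PORT B =====
def mvStep (c : Char) : Option Char :=
  if PySem.Chars.isalpha c then none
  else if c = ',' then some '.'
  else if c = ' ' ∨ c = '%' then none
  else some c

def make_value_alt (value : String) : String :=
  String.mk (value.toList.filterMap mvStep)

-- ===== PRECONDITION & SPEC =====
def Spec_make_value (value : String) (out : String) : Prop := out = make_value_alt value
instance (value : String) (out : String) : Decidable (Spec_make_value value out) := by unfold Spec_make_value; infer_instance

-- ===== CLAIM (what is proved, stated in full; the proofs are below) =====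
def Claim_equal_make_value : Prop := ∀ (value : String), Dom_make_value value → Spec_make_value value (make_value value)

-- ===== LEMMAS AND PROOFS =====

-- single-char replace is a flatMap
theorem replace_go_single (o : Char) (nw : List Char) :
    ∀ (l acc : List Char) (fuel : Nat), l.length ≤ fuel →
      PySem.Chars.replace.go [o] nw fuel l acc
        = acc.reverse ++ l.flatMap (fun c => if c = o then nw else [c]) := by
  intro l
  induction l with
  | nil =>
    intro acc fuel _
    cases fuel <;> simp [PySem.Chars.replace.go]
  | cons c t ih =>
    intro acc fuel hf
    cases fuel with
    | zero => simp at hf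
    | succ n =>
      simp only [PySem.Chars.replace.go, List.isPrefixOf, List.flatMap_cons]
      by_cases h : c = o
      · simp [h, ih _ n (by simpa using hf)]
      · have : (o == c) = false := by simp [Ne.symm h]
        simp [this, h, ih _ n (by simpa using hf)]

theorem replace_single (o : Char) (nw l : List Char) :
    PySem.Chars.replace l [o] nw = l.flatMap (fun c => if c = o then nw else [c]) := by
  simp [PySem.Chars.replace, replace_go_single o nw l [] l.length (le_refl _)]

theorem flatMap_id_of_not_mem (o : Char) (nw : List Char) (l : List Char) (h : o ∉ l) :
    l.flatMap (fun c => if c = o then nw else [c]) = l := by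
  induction l with
  | nil => simp
  | cons c t ih =>
    simp only [List.mem_cons, not_or] at h
    simp [Ne.symm, h.1, ih h.2]

theorem isIn_single_iff (o : Char) (l : List Char) :
    PySem.Chars.isIn [o] l = true ↔ o ∈ l := by
  rw [PySem.Chars.isIn_iff_infix]
  constructor
  · rintro ⟨p, q, hpq⟩
    subst hpq; simp
  · intro h
    obtain ⟨p, q, hpq⟩ := List.append_of_mem h
    exact ⟨p, q, by simp [hpq]⟩

-- the three replace passes (each applied conditionally) followed by the alpha filter = one filterMap
theorem chain_eq (l : List Char) :
    (let v1 := if PySem.Chars.isIn [','] l then PySem.Chars.replace l [','] ['.'] else l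
     let v2 := if PySem.Chars.isIn [' '] v1 then PySem.Chars.replace v1 [' '] [] else v1
     let v3 := if PySem.Chars.isIn ['%'] v2 then PySem.Chars.replace v2 ['%'] [] else v2
     v3.filter (fun c => !PySem.Chars.isalpha c)) = l.filterMap mvStep := by
  have unify : ∀ (o : Char) (nw m : List Char),
      (if PySem.Chars.isIn [o] m then PySem.Chars.replace m [o] nw else m)
        = m.flatMap (fun c => if c = o then nw else [c]) := by
    intro o nw m
    by_cases h : PySem.Chars.isIn [o] m = true
    · simp [h, replace_single]
    · rw [if_neg h, flatMap_id_of_not_mem]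
      intro hm
      exact h ((isIn_single_iff o m).mpr hm)
  simp only [unify]
  induction l with
  | nil => rfl
  | cons c t ih =>
    simp only [List.flatMap_cons, List.filterMap_cons]
    by_cases ha : PySem.Chars.isalpha c = true
    · have h1 : c ≠ ',' := by rintro rfl; exact absurd ha (by decide)
      have h2 : c ≠ ' ' := by rintro rfl; exact absurd ha (by decide)
      have h3 : c ≠ '%' := by rintro rfl; exact absurd ha (by decide)
      simp [mvStep, ha, h1, h2, h3, List.filter_cons, ih]
    · by_cases h1 : c = ','
      · subst h1
        simp only [if_pos rfl]
        have : ('.' : Char) ≠ ' ' ∧ ('.' : Char) ≠ '%' := by decide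
        simp [mvStep, ha, this.1, this.2, List.filter_cons, ih,
          show PySem.Chars.isalpha '.' = false by decide]
      · by_cases h2 : c = ' '
        · subst h2; simp [mvStep, ha, List.filter_cons, ih]
        · by_cases h3 : c = '%'
          · subst h3
            simp [mvStep, ha, List.filter_cons, ih, h1]
          · simp [mvStep, ha, h1, h2, h3, List.filter_cons, ih]

-- ===== VERDICT (by name: the statement is the Claim_ definition above) =====
theorem make_value_spec : Claim_equal_make_value := by
  intro value _
  unfold Spec_make_value make_value make_value_alt
  simp only [PySem.Chars.join_nil_singletons]
  rw [chain_eq value.toList]
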